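-- pv_equiv track=rewrite | github.com/yysmlz/BBG | bloomberg/Re-order Array Based on Dictionary/main.py | solution
-- ===== SOURCE A (Python) =====
-- from collections import defaultdict, deque
-- from typing import Dict, List, Tuple, Any
--
-- def solution(employees: List[Tuple[str, str]], reports: Dict[str, Any]) -> List[Tuple[str, str]]:
--     # find ordering based on reports w/ topo sort
--     ind = {}
--     graph = defaultdict(list)
--     for k, v in reports.items():
--         graph[v].append(k)
--         ind.setdefault(k, 0)
--         ind.setdefault(v, 0)
--         ind[k] += 1
--
--     # find ordering from CEO, reverse the order
--     orders = {}
--     order = len(ind)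
--     q = deque(title for title, indegree in ind.items() if not indegree)
--     while q:
--         for _ in range(len(q)):
--             cur_title = q.popleft()
--             orders[cur_title] = order
--             for n_title in graph[cur_title]:
--                 ind[n_title] -= 1
--                 if not ind[n_title]:
--                     q.append(n_title)
--         order -= 1
--
--     return sorted(employees, key=lambda x: (orders[x[1]]))
-- ===== SOURCE B (Python) =====
-- def solution(employees, reports):
--     # Order employees by distance from a root of the reporting forest (deepest first,
--     # stable on ties), computed per title by walking the manager chain upwards.
--     def depth(title):
--         d, t = 0, title
--         for _ in range(len(reports) + 1):
--             if t not in reports: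
--                 return d
--             t = reports[t]
--             d += 1
--         raise KeyError(title)  # title sits on a reporting cycle: it has no level
--     return sorted(employees, key=lambda e: -depth(e[1]))
-- ===== Notes on version B (the rewrite author's own statement) =====
-- stated objective: simpler
-- what changed: A builds an adjacency dict and indegrees and runs a level-by-level queue-based topological BFS to number titles; B drops the graph entirely and computes each title's level directly by walking its manager chain upward (depth = hops to a root), then stably sorts employees by -depth, which induces the same order as A's keys.
import Mathlib
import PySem

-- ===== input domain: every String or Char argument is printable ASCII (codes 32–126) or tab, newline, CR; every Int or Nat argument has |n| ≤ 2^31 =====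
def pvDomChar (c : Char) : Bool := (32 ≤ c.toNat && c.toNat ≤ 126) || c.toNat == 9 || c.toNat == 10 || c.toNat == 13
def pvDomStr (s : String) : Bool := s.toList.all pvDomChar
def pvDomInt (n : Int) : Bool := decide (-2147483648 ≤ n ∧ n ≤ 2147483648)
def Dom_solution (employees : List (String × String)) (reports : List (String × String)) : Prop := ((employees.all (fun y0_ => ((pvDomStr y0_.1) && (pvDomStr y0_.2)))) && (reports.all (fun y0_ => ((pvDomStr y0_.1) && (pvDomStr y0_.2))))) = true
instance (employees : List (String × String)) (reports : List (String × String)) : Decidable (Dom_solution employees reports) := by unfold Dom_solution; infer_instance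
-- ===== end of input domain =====

-- B (solution_alt) replaces A's indegree/queue topological BFS by a direct manager-chain walk
-- per title (depth = number of hops to a root), sorting employees by -depth: simpler, no graph.

-- ===== PORT A =====
-- first loop of A: builds (graph, ind) from reports.items()
def pvStep1 (st : PySem.Dict String (List String) × PySem.Dict String Int) (p : String × String) :
    PySem.Dict String (List String) × PySem.Dict String Int :=
  (st.1.modify p.2 [] (· ++ [p.1]),
   (((st.2.setdefault p.1 0).setdefault p.2 0).modify p.1 0 (· + 1)))

-- inner 'for n_title in graph[cur_title]' loop
def pvInner (st : PySem.Dict String Int × List String) (cs : List String) :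
    PySem.Dict String Int × List String :=
  cs.foldl (fun st n =>
    let ind := st.1.modify n 0 (· - 1)
    if ind.getD n 0 = 0 then (ind, st.2 ++ [n]) else (ind, st.2)) st

-- 'for _ in range(len(q))': processes one BFS level (the popped items), collecting the next level
def pvLevel (graph : PySem.Dict String (List String)) (order : Int)
    (st : PySem.Dict String Int × PySem.Dict String Int × List String) (q : List String) :
    PySem.Dict String Int × PySem.Dict String Int × List String :=
  q.foldl (fun st cur =>
    let orders := st.2.1.insert cur order
    let inner := pvInner (st.1, st.2.2) (graph.getD cur [])
    (inner.1, orders, inner.2)) st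

-- the 'while q' loop, totalized with fuel len(reports)+2 (enough: level d is empty once d
-- exceeds the number of report keys, proved in pvBFS_char below)
def pvBFS (graph : PySem.Dict String (List String)) :
    Nat → PySem.Dict String Int → PySem.Dict String Int → List String → Int → PySem.Dict String Int
  | 0, _, orders, _, _ => orders
  | fuel+1, ind, orders, q, order =>
    if q = [] then orders
    else
      pvBFS graph fuel (pvLevel graph order (ind, orders, []) q).1
        (pvLevel graph order (ind, orders, []) q).2.1
        (pvLevel graph order (ind, orders, []) q).2.2 (order - 1)

-- orders[x[1]] raises KeyError when absent: those inputs are excluded by Pre_solution,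
-- so the sort key is ported with getD (the default is never read under Pre_solution)
def solution (employees : List (String × String)) (reports : List (String × String)) :
    List (String × String) :=
  let reps := (PySem.Dict.ofList reports).items
  let gi := reps.foldl pvStep1 (PySem.Dict.empty, PySem.Dict.empty)
  let orders := pvBFS gi.1 (reps.length + 2) gi.2 PySem.Dict.empty
      ((gi.2.items.filter (fun p => p.2 == 0)).map (·.1)) (gi.2.size)
  PySem.List.sorted employees (fun x => orders.getD x.2 0) false

-- ===== PORT B =====
-- B's depth(title): walk the manager chain; none = the loop ran out = KeyError (cycle);
-- under Pre_solution the walk always succeeds, so the .getD 0 default is never read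
def pvWalk (rep : PySem.Dict String String) : Nat → Int → String → Option Int
  | 0, _, _ => none
  | f+1, d, t =>
    match rep.get? t with
    | none => some d
    | some p => pvWalk rep f (d + 1) p

def solution_alt (employees : List (String × String)) (reports : List (String × String)) :
    List (String × String) :=
  let rep := PySem.Dict.ofList reports
  PySem.List.sorted employees (fun e => -((pvWalk rep (rep.size + 1) 0 e.2).getD 0)) false

-- ===== PRECONDITION & SPEC =====
-- spec-level helpers for Pre_ (used by neither port)
def pvAppearsb (reps : List (String × String)) (t : String) : Bool :=
  decide (t ∈ reps.map (·.1)) || decide (t ∈ reps.map (·.2))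

-- length of the manager chain from t (none = no root reached within the given fuel)
def pvChain (rep : PySem.Dict String String) : Nat → String → Option Nat
  | 0, _ => none
  | f+1, t =>
    match rep.get? t with
    | none => some 0
    | some p => (pvChain rep f p).map (· + 1)

-- Pre_ is exactly the domain on which A returns: every employee title occurs in the report
-- table and its manager chain reaches a root (otherwise A's orders[x[1]] raises KeyError).
def Pre_solution (employees : List (String × String)) (reports : List (String × String)) : Prop :=
  ∀ e ∈ employees,
    pvAppearsb (PySem.Dict.ofList reports).items e.2 = true ∧
    (pvChain (PySem.Dict.ofList reports) ((PySem.Dict.ofList reports).items.length + 1) e.2).isSome = true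
instance (employees : List (String × String)) (reports : List (String × String)) : Decidable (Pre_solution employees reports) := by unfold Pre_solution; infer_instance

def pvWitness_solution : (List (String × String)) × (List (String × String)) :=
  ([("alice", "CEO"), ("bob", "Dev"), ("carol", "Mgr")], [("Dev", "Mgr"), ("Mgr", "CEO")])

def Spec_solution (employees : List (String × String)) (reports : List (String × String)) (out : List (String × String)) : Prop := out = solution_alt employees reports
instance (employees : List (String × String)) (reports : List (String × String)) (out : List (String × String)) : Decidable (Spec_solution employees reports out) := by unfold Spec_solution; infer_instance

-- ===== CLAIM (what is proved, stated in full; the proofs are below) =====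
def Claim_equal_solution : Prop := ∀ (employees : List (String × String)) (reports : List (String × String)), Dom_solution employees reports → Pre_solution employees reports → Spec_solution employees reports (solution employees reports)


-- ===== LEMMAS AND PROOFS =====

theorem pv_get?_char {ν : Type} (d : PySem.Dict String ν) (d0 : ν) (t : String) :
    d.get? t = if d.contains t = true then some (d.getD t d0) else none := by
  have hc := PySem.Dict.contains_eq_isSome_get? d t
  have hg := PySem.Dict.getD_eq_get?_getD d t d0
  cases h : d.get? t <;> simp [h] at hc hg ⊢ <;> simp [hc, hg]

theorem pv_getD_setdefault {ν : Type} (d : PySem.Dict String ν) (k t : String) (v : ν) :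
    (d.setdefault k v).getD t v = d.getD t v := by
  by_cases h : t = k
  · subst h; rw [PySem.Dict.getD_setdefault_self]
  · rw [PySem.Dict.getD_eq_get?_getD, PySem.Dict.get?_setdefault_of_ne _ _ h,
      ← PySem.Dict.getD_eq_get?_getD]

theorem pv_nodup_keys_setdefault {ν : Type} (d : PySem.Dict String ν) (k : String) (v : ν)
    (h : d.keys.Nodup) : (d.setdefault k v).keys.Nodup := by
  rw [PySem.Dict.keys_setdefault]
  by_cases hc : d.contains k = true
  · simp [hc, h]
  · simp only [Bool.not_eq_true] at hc
    simp [hc]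
    have hk : k ∉ d.keys := by rw [← PySem.Dict.contains_iff_mem_keys]; simp [hc]
    simp [List.nodup_append, h]
    exact fun a ha hak => hk (hak ▸ ha)

theorem pv_ind_build (l : List (String × String)) (d : PySem.Dict String Int) (K V : List String)
    (hn : (K ++ l.map (·.1)).Nodup)
    (hc : ∀ t, d.contains t = (decide (t ∈ K) || decide (t ∈ V)))
    (hg : ∀ t, d.getD t 0 = if t ∈ K then 1 else 0)
    (hkn : d.keys.Nodup) :
    (∀ t, (l.foldl (fun d p => ((d.setdefault p.1 0).setdefault p.2 0).modify p.1 0 (· + 1)) d).contains t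
        = (decide (t ∈ K ++ l.map (·.1)) || decide (t ∈ V ++ l.map (·.2)))) ∧
    (∀ t, (l.foldl (fun d p => ((d.setdefault p.1 0).setdefault p.2 0).modify p.1 0 (· + 1)) d).getD t 0
        = if t ∈ K ++ l.map (·.1) then 1 else 0) ∧
    (l.foldl (fun d p => ((d.setdefault p.1 0).setdefault p.2 0).modify p.1 0 (· + 1)) d).keys.Nodup := by
  induction l generalizing d K V with
  | nil => simpa using ⟨hc, hg, hkn⟩
  | cons p l ih =>
    obtain ⟨k, v⟩ := p
    simp only [List.foldl_cons]
    set d1 := (d.setdefault k 0).setdefault v 0 with hd1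
    set d2 := d1.modify k 0 (· + 1) with hd2
    have hkK : k ∉ K := by
      simp [List.nodup_append] at hn
      exact fun hkK => (hn.2.2 k hkK).1 rfl
    have hc2 : ∀ t, d2.contains t = (decide (t ∈ K ++ [k]) || decide (t ∈ V ++ [v])) := by
      intro t
      rw [hd2, PySem.Dict.contains_modify, hd1, PySem.Dict.contains_setdefault,
        PySem.Dict.contains_setdefault, hc]
      simp [List.mem_append, Bool.or_comm, Bool.or_assoc, Bool.or_left_comm, eq_comm, BEq.beq]
    have hg1 : ∀ t, d1.getD t 0 = d.getD t 0 := by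
      intro t
      rw [hd1, pv_getD_setdefault, pv_getD_setdefault]
    have hg2 : ∀ t, d2.getD t 0 = if t ∈ K ++ [k] then 1 else 0 := by
      intro t
      rw [hd2, PySem.Dict.getD_modify]
      by_cases htk : t = k
      · simp [htk, hg1, hg, hkK]
      · simp [htk, hg1, hg]
    have hkn2 : d2.keys.Nodup := by
      have h1 : d1.keys.Nodup :=
        pv_nodup_keys_setdefault _ _ _ (pv_nodup_keys_setdefault _ _ _ hkn)
      rw [hd2, PySem.Dict.keys_modify, PySem.Dict.keys_insert_of_contains]
      · exact h1
      · rw [hd1, PySem.Dict.contains_setdefault, PySem.Dict.contains_setdefault]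
        simp
    have hn' : ((K ++ [k]) ++ l.map (·.1)).Nodup := by
      simpa [List.append_assoc] using hn
    obtain ⟨c3, g3, n3⟩ := ih d2 (K ++ [k]) (V ++ [v]) hn' hc2 hg2 hkn2
    refine ⟨fun t => ?_, fun t => ?_, n3⟩
    · rw [c3 t]; simp only [List.append_assoc, List.singleton_append, List.map_cons]
      exact congrArg₂ (· || ·) (decide_eq_decide.mpr Iff.rfl) (decide_eq_decide.mpr Iff.rfl)
    · rw [g3 t]; simp only [List.append_assoc, List.singleton_append, List.map_cons]
      exact if_congr Iff.rfl rfl rfl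

theorem pvChain_mono (rep : PySem.Dict String String) (f : Nat) (t : String) (e : Nat)
    (h : pvChain rep f t = some e) : pvChain rep (f+1) t = some e := by
  induction f generalizing t e with
  | zero => simp [pvChain] at h
  | succ f ih =>
    rw [pvChain] at h ⊢
    cases hp : rep.get? t with
    | none => simpa [hp] using h
    | some p =>
      simp [hp] at h ⊢
      obtain ⟨e', he', rfl⟩ := h
      exact ⟨e', ih p e' he', rfl⟩

theorem pvChain_mono_le (rep : PySem.Dict String String) (f f' : Nat) (t : String) (e : Nat)
    (hle : f ≤ f') (h : pvChain rep f t = some e) : pvChain rep f' t = some e := by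
  obtain ⟨k, rfl⟩ := Nat.exists_eq_add_of_le hle
  induction k with
  | zero => simpa using h
  | succ k ih =>
    have : f + (k + 1) = (f + k) + 1 := rfl
    rw [this]
    exact pvChain_mono rep (f + k) t e (ih (by omega))

theorem pvChain_min (rep : PySem.Dict String String) (f : Nat) (t : String) (e : Nat)
    (h : pvChain rep f t = some e) : pvChain rep (e+1) t = some e := by
  induction f generalizing t e with
  | zero => simp [pvChain] at h
  | succ f ih =>
    rw [pvChain] at h
    cases hp : rep.get? t with
    | none => simp [hp] at h; subst h; simp [pvChain, hp]
    | some p =>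
      simp [hp] at h
      obtain ⟨e', he', rfl⟩ := h
      have := ih p e' he'
      rw [pvChain, hp]
      simp [this]

theorem pvChain_lt_fuel (rep : PySem.Dict String String) (f : Nat) (t : String) (e : Nat)
    (h : pvChain rep f t = some e) : e < f := by
  induction f generalizing t e with
  | zero => simp [pvChain] at h
  | succ f ih =>
    rw [pvChain] at h
    cases hp : rep.get? t with
    | none => simp [hp] at h; omega
    | some p =>
      simp [hp] at h
      obtain ⟨e', he', rfl⟩ := h
      have := ih p e' he'
      omega

theorem pvWalk_eq_chain (rep : PySem.Dict String String) (f : Nat) (d : Int) (t : String) :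
    pvWalk rep f d t = (pvChain rep f t).map (fun n => d + (n : Int)) := by
  induction f generalizing d t with
  | zero => simp [pvWalk, pvChain]
  | succ f ih =>
    rw [pvWalk, pvChain]
    cases hp : rep.get? t with
    | none => simp
    | some p =>
      simp [ih]
      cases pvChain rep f p
      · simp
      · simp
        ring


theorem pvChain_det (rep : PySem.Dict String String) (f f' : Nat) (t : String) (a b : Nat)
    (ha : pvChain rep f t = some a) (hb : pvChain rep f' t = some b) : a = b := by
  have h1 := pvChain_min rep f t a ha
  have h2 := pvChain_min rep f' t b hb
  rcases Nat.le_total (a+1) (b+1) with h | h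
  · have := pvChain_mono_le rep (a+1) (b+1) t a h h1
    rw [this] at h2; injection h2
  · have := pvChain_mono_le rep (b+1) (a+1) t b h h2
    rw [this] at h1; injection h1 with h1; omega

def pvCK (rep : PySem.Dict String String) : Nat → String → List String
  | 0, _ => []
  | f+1, t =>
    match rep.get? t with
    | none => []
    | some p => t :: pvCK rep f p

theorem pvCK_subset (rep : PySem.Dict String String) (f : Nat) (t : String) :
    ∀ s ∈ pvCK rep f t, s ∈ rep.keys := by
  induction f generalizing t with
  | zero => simp [pvCK]
  | succ f ih =>
    rw [pvCK]
    cases hp : rep.get? t with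
    | none => simp
    | some p =>
      intro s hs
      rcases List.mem_cons.mp hs with rfl | hs
      · by_contra hmem
        rw [← PySem.Dict.get?_eq_none_iff_not_mem_keys] at hmem
        rw [hmem] at hp; cases hp
      · exact ih p s hs

theorem pvCK_length (rep : PySem.Dict String String) (f : Nat) (t : String) (e : Nat)
    (h : pvChain rep f t = some e) : (pvCK rep f t).length = e := by
  induction f generalizing t e with
  | zero => simp [pvChain] at h
  | succ f ih =>
    rw [pvChain] at h
    rw [pvCK]
    cases hp : rep.get? t with
    | none => simp [hp] at h ⊢; omega
    | some p =>
      simp [hp] at h ⊢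
      obtain ⟨e', he', rfl⟩ := h
      simp [ih p e' he']

theorem pvCK_val (rep : PySem.Dict String String) (f : Nat) (t : String) (e : Nat)
    (h : pvChain rep f t = some e) :
    ∀ s ∈ pvCK rep f t, ∃ fs es, pvChain rep fs s = some es ∧ es ≤ e := by
  induction f generalizing t e with
  | zero => simp [pvCK]
  | succ f ih =>
    rw [pvChain] at h
    rw [pvCK]
    cases hp : rep.get? t with
    | none => simp
    | some p =>
      simp [hp] at h
      obtain ⟨e', he', rfl⟩ := h
      intro s hs
      rcases List.mem_cons.mp hs with rfl | hs
      · exact ⟨f + 1, e' + 1, by rw [pvChain, hp]; simp [he'], le_refl _⟩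
      · obtain ⟨fs, es, hc, hle⟩ := ih p e' he' s hs
        exact ⟨fs, es, hc, by omega⟩

theorem pvCK_nodup (rep : PySem.Dict String String) (f : Nat) (t : String) (e : Nat)
    (h : pvChain rep f t = some e) : (pvCK rep f t).Nodup := by
  induction f generalizing t e with
  | zero => simp [pvCK]
  | succ f ih =>
    rw [pvChain] at h
    rw [pvCK]
    cases hp : rep.get? t with
    | none => simp
    | some p =>
      simp [hp] at h
      obtain ⟨e', he', rfl⟩ := h
      refine List.nodup_cons.mpr ⟨?_, ih p e' he'⟩
      intro hmem
      obtain ⟨fs, es, hc, hle⟩ := pvCK_val rep f p e' he' t hmem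
      have : pvChain rep (f+1) t = some (e'+1) := by rw [pvChain, hp]; simp [he']
      have := pvChain_det rep fs (f+1) t es (e'+1) hc this
      omega

theorem pvChain_bound (rep : PySem.Dict String String)
    (f : Nat) (t : String) (e : Nat) (h : pvChain rep f t = some e) : e ≤ rep.keys.length := by
  have hlen := pvCK_length rep f t e h
  have hnd := pvCK_nodup rep f t e h
  have hsub : pvCK rep f t ⊆ rep.keys := fun s hs => pvCK_subset rep f t s hs
  calc e = (pvCK rep f t).length := hlen.symm
  _ = (pvCK rep f t).toFinset.card := (List.toFinset_card_of_nodup hnd).symm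
  _ ≤ rep.keys.toFinset.card := Finset.card_le_card (by intro x hx; simp at hx ⊢; exact hsub hx)
  _ ≤ rep.keys.length := rep.keys.toFinset_card_le

def pvChildren (reps : List (String × String)) (c : String) : List String :=
  (reps.filter (fun p => p.2 == c)).map (·.1)

def pvLayer (reps : List (String × String)) (q0 : List String) : Nat → List String
  | 0 => q0
  | d+1 => (pvLayer reps q0 d).flatMap (pvChildren reps)

theorem pvChildren_mem (rep : PySem.Dict String String) (hk : rep.keys.Nodup) (c n : String) :
    n ∈ pvChildren rep.items c ↔ rep.get? n = some c := by
  rw [PySem.Dict.get?_eq_some_iff_mem_items _ _ _ hk]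
  simp only [pvChildren, List.mem_map, List.mem_filter]
  constructor
  · rintro ⟨⟨a, b⟩, ⟨hm, hb⟩, rfl⟩
    simp at hb; subst hb; exact hm
  · intro hm; exact ⟨(n, c), ⟨hm, by simp⟩, rfl⟩

theorem pvChildren_nodup (rep : PySem.Dict String String) (hk : rep.keys.Nodup) (c : String) :
    (pvChildren rep.items c).Nodup := by
  have hsub : List.Sublist ((rep.items.filter (fun p => p.2 == c)).map (·.1)) (rep.items.map (·.1)) := List.Sublist.map _ List.filter_sublist
  have : (rep.items.map (·.1)).Nodup := by
    simpa [PySem.Dict.keys] using hk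
  exact this.sublist hsub

theorem pvLayer_mem (rep : PySem.Dict String String) (hk : rep.keys.Nodup) (q0 : List String)
    (hq0 : ∀ t, t ∈ q0 ↔ (pvAppearsb rep.items t = true ∧ rep.get? t = none)) :
    ∀ d t, t ∈ pvLayer rep.items q0 d ↔
      (pvAppearsb rep.items t = true ∧ pvChain rep (d+1) t = some d) := by
  intro d
  induction d with
  | zero =>
    intro t
    rw [pvLayer, hq0 t]
    cases hp : rep.get? t <;> simp [pvChain, hp]
  | succ d ih =>
    intro t
    rw [pvLayer]
    simp only [List.mem_flatMap]
    constructor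
    · rintro ⟨c, hc, htc⟩
      rw [ih c] at hc
      rw [pvChildren_mem rep hk c t] at htc
      refine ⟨?_, ?_⟩
      · have : t ∈ rep.keys := by
          by_contra hmem
          rw [← PySem.Dict.get?_eq_none_iff_not_mem_keys] at hmem
          rw [hmem] at htc; cases htc
        simp only [pvAppearsb]
        simp only [PySem.Dict.keys] at this
        simp [this]
      · rw [pvChain, htc]
        simp [hc.2]
    · rintro ⟨happ, hch⟩
      rw [pvChain] at hch
      cases hp : rep.get? t with
      | none => rw [hp] at hch; simp at hch
      | some p =>
        rw [hp] at hch
        simp only [Option.map_eq_some_iff] at hch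
        obtain ⟨e', he', hee⟩ := hch
        have hed : e' = d := by omega
        subst hed
        refine ⟨p, ?_, (pvChildren_mem rep hk p t).mpr hp⟩
        rw [ih p]
        have happ_p : pvAppearsb rep.items p = true := by
          have : (t, p) ∈ rep.items := (PySem.Dict.get?_eq_some_iff_mem_items _ _ _ hk).mp hp
          simp only [pvAppearsb]
          have : p ∈ rep.items.map (·.2) := List.mem_map.mpr ⟨(t, p), this, rfl⟩
          simp [this]
        exact ⟨happ_p, he'⟩

theorem pvLayer_nodup (rep : PySem.Dict String String) (hk : rep.keys.Nodup) (q0 : List String)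
    (_hq0 : ∀ t, t ∈ q0 ↔ (pvAppearsb rep.items t = true ∧ rep.get? t = none)) (hq0n : q0.Nodup) :
    ∀ d, (pvLayer rep.items q0 d).Nodup := by
  intro d
  induction d with
  | zero => exact hq0n
  | succ d ih =>
    rw [pvLayer, List.nodup_flatMap]
    refine ⟨fun c _ => pvChildren_nodup rep hk c, ?_⟩
    refine ih.imp ?_
    intro c1 c2 hne n h1 h2

    rw [pvChildren_mem rep hk] at h1 h2
    rw [h1] at h2
    exact hne (by injection h2)

theorem pvLayer_empty_mono (reps : List (String × String)) (q0 : List String) (d e : Nat)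
    (hde : d ≤ e) (h : pvLayer reps q0 d = []) : pvLayer reps q0 e = [] := by
  obtain ⟨k, rfl⟩ := Nat.exists_eq_add_of_le hde
  induction k with
  | zero => simpa using h
  | succ k ih =>
    have : d + (k + 1) = (d + k) + 1 := rfl
    rw [this, pvLayer, ih (by omega)]
    rfl

theorem pv_graph_build (reps : List (String × String)) (c : String) :
    (reps.foldl (fun d p => d.modify p.2 [] (· ++ [p.1])) PySem.Dict.empty).getD c []
      = pvChildren reps c := by
  have h : reps.foldl (fun d p => d.modify p.2 [] (· ++ [p.1])) PySem.Dict.empty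
      = (reps.map Prod.swap).foldl (fun d p => d.modify p.1 [] (· ++ [p.2])) PySem.Dict.empty := by
    rw [List.foldl_map]
    simp [Prod.swap]
  rw [h, PySem.Dict.getD_foldl_modify_append]
  simp [pvChildren, List.filter_map, List.map_map]
  rfl

def pvDepth (rep : PySem.Dict String String) (t : String) : Option Nat :=
  pvChain rep (rep.items.length + 1) t

def pvOrdCut (rep : PySem.Dict String String) (N : Int) (d : Nat) (q₁ : List String)
    (orders : PySem.Dict String Int) : Prop :=
  ∀ t, orders.get? t =
    match pvDepth rep t with
    | some e => if pvAppearsb rep.items t = true ∧ (e < d ∨ (e = d ∧ t ∈ q₁)) then some (N - (e : Int)) else none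
    | none => none

def pvIndCut (rep : PySem.Dict String String) (d : Nat) (q₁ : List String)
    (ind : PySem.Dict String Int) : Prop :=
  ∀ n, ind.getD n 0 =
    match rep.get? n with
    | none => 0
    | some c =>
      match pvDepth rep c with
      | some e => if e < d ∨ (e = d ∧ c ∈ q₁) then 0 else 1
      | none => 1

theorem pvInner_char (ind : PySem.Dict String Int) (nq cs : List String)
    (hnd : cs.Nodup) (h1 : ∀ n ∈ cs, ind.getD n 0 = 1) :
    (pvInner (ind, nq) cs).2 = nq ++ cs ∧
    (∀ m, (pvInner (ind, nq) cs).1.getD m 0 = if m ∈ cs then 0 else ind.getD m 0) := by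
  induction cs generalizing ind nq with
  | nil => simp [pvInner]
  | cons n cs ih =>
    have hn0 : (ind.modify n 0 (· - 1)).getD n 0 = 0 := by
      rw [PySem.Dict.getD_modify]
      simp [h1 n (List.mem_cons_self)]
    have hstep : pvInner (ind, nq) (n :: cs)
        = pvInner (ind.modify n 0 (· - 1), nq ++ [n]) cs := by
      simp only [pvInner, List.foldl_cons, hn0]
      simp
    rw [hstep]
    have hcs : cs.Nodup := (List.nodup_cons.mp hnd).2
    have hnin : n ∉ cs := (List.nodup_cons.mp hnd).1
    have h1' : ∀ m ∈ cs, (ind.modify n 0 (· - 1)).getD m 0 = 1 := by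
      intro m hm
      rw [PySem.Dict.getD_modify]
      have : m ≠ n := fun hmn => hnin (hmn ▸ hm)
      simp [this, h1 m (List.mem_cons_of_mem _ hm)]
    obtain ⟨hq, hind⟩ := ih (ind.modify n 0 (· - 1)) (nq ++ [n]) hcs h1'
    refine ⟨by rw [hq]; simp, fun m => ?_⟩
    rw [hind m]
    by_cases hm : m ∈ cs
    · simp [hm]
    · by_cases hmn : m = n
      · subst hmn; simp [hm, hn0]
      · rw [PySem.Dict.getD_modify]
        simp [hm, hmn]

theorem pvLevel_char (rep : PySem.Dict String String) (hk : rep.keys.Nodup) (q0 : List String)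
    (hq0 : ∀ t, t ∈ q0 ↔ (pvAppearsb rep.items t = true ∧ rep.get? t = none)) (hq0n : q0.Nodup)
    (g : PySem.Dict String (List String)) (hg : ∀ c, g.getD c [] = pvChildren rep.items c)
    (N : Int) (d : Nat) (hd : d ≤ rep.items.length) :
    ∀ (q₂ q₁ : List String) (ind orders : PySem.Dict String Int) (nq : List String),
      pvLayer rep.items q0 d = q₁ ++ q₂ →
      pvOrdCut rep N d q₁ orders →
      pvIndCut rep d q₁ ind →
      nq = q₁.flatMap (pvChildren rep.items) →
      pvOrdCut rep N d (q₁ ++ q₂) (pvLevel g (N - (d : Int)) (ind, orders, nq) q₂).2.1 ∧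
      pvIndCut rep d (q₁ ++ q₂) (pvLevel g (N - (d : Int)) (ind, orders, nq) q₂).1 ∧
      (pvLevel g (N - (d : Int)) (ind, orders, nq) q₂).2.2 = (q₁ ++ q₂).flatMap (pvChildren rep.items) := by
  intro q₂
  induction q₂ with
  | nil =>
    intro q₁ ind orders nq hsplit hord hind hnq
    simp only [pvLevel, List.foldl_nil, List.append_nil]
    exact ⟨hord, hind, hnq⟩
  | cons cur q₂ ih =>
    intro q₁ ind orders nq hsplit hord hind hnq
    -- facts about cur
    have hcur_mem : cur ∈ pvLayer rep.items q0 d := by rw [hsplit]; simp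
    have hcur := (pvLayer_mem rep hk q0 hq0 d cur).mp hcur_mem
    have hcur_dep : pvDepth rep cur = some d :=
      pvChain_mono_le rep (d+1) (rep.items.length + 1) cur d (by omega) hcur.2
    have hlnd := pvLayer_nodup rep hk q0 hq0 hq0n d
    have hcur_q₁ : cur ∉ q₁ := by
      rw [hsplit] at hlnd
      have := List.Nodup.of_append_right (l₁ := q₁) hlnd
      intro hq
      rw [List.nodup_append] at hlnd
      exact hlnd.2.2 cur hq cur (by simp) rfl
    -- one fold step
    have hstep : pvLevel g (N - (d : Int)) (ind, orders, nq) (cur :: q₂)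
        = pvLevel g (N - (d : Int))
            ((pvInner (ind, nq) (g.getD cur [])).1,
             orders.insert cur (N - (d : Int)),
             (pvInner (ind, nq) (g.getD cur [])).2) q₂ := by
      simp only [pvLevel, List.foldl_cons]
    have hcs := hg cur
    have hcs_nodup : (g.getD cur []).Nodup := by rw [hcs]; exact pvChildren_nodup rep hk cur
    have hcs1 : ∀ n ∈ g.getD cur [], ind.getD n 0 = 1 := by
      intro n hn
      rw [hcs] at hn
      have hpar : rep.get? n = some cur := (pvChildren_mem rep hk cur n).mp hn
      have h2 := hind n
      simp only [hpar] at h2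
      rw [hcur_dep] at h2
      rw [h2]
      simp [hcur_q₁]
    obtain ⟨hinq, hiind⟩ := pvInner_char ind nq (g.getD cur []) hcs_nodup hcs1
    -- new invariants for q₁ ++ [cur]
    have hord' : pvOrdCut rep N d (q₁ ++ [cur]) (orders.insert cur (N - (d : Int))) := by
      intro t
      rw [PySem.Dict.get?_insert]
      by_cases htc : t = cur
      · subst htc
        rw [hcur_dep]
        simp [hcur.1]
      · rw [hord t]
        cases hdep : pvDepth rep t with
        | none => simp [htc]
        | some e =>
          have : (t ∈ q₁ ++ [cur]) ↔ t ∈ q₁ := by simp [htc]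
          simp only [htc, if_false, this]
    have hind' : pvIndCut rep d (q₁ ++ [cur]) (pvInner (ind, nq) (g.getD cur [])).1 := by
      intro n
      rw [hiind n]
      cases hpn : rep.get? n with
      | none =>
        have hnin : n ∉ g.getD cur [] := by
          rw [hcs]
          intro hn
          rw [(pvChildren_mem rep hk cur n)] at hn
          rw [hn] at hpn; cases hpn
        have h2 := hind n
        simp only [hpn] at h2 ⊢
        simp [hnin, h2]
      | some c =>
        by_cases hcc : c = cur
        · have hnin : n ∈ g.getD cur [] := by
            rw [hcs]; exact (pvChildren_mem rep hk cur n).mpr (hcc ▸ hpn)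
          simp only [hnin, if_true, hcc, hcur_dep]
          simp
        · have hnin : n ∉ g.getD cur [] := by
            rw [hcs]
            intro hn
            rw [(pvChildren_mem rep hk cur n)] at hn
            rw [hn] at hpn
            injection hpn with hpn
            exact hcc hpn.symm
          have h2 := hind n
          simp only [hpn] at h2 ⊢
          rw [if_neg (by simp [hnin]), h2]
          cases hdc : pvDepth rep c with
          | none => simp
          | some e =>
            have : (c ∈ q₁ ++ [cur]) ↔ c ∈ q₁ := by simp [hcc]
            simp only [this]
    have hnq' : (pvInner (ind, nq) (g.getD cur [])).2 = (q₁ ++ [cur]).flatMap (pvChildren rep.items) := by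
      rw [hinq, hnq, hcs]
      simp
    have hsplit' : pvLayer rep.items q0 d = (q₁ ++ [cur]) ++ q₂ := by
      rw [hsplit]; simp
    obtain ⟨ho, hi, hn⟩ := ih (q₁ ++ [cur]) _ _ _ hsplit' hord' hind' hnq'
    rw [hstep]
    have happ : (q₁ ++ [cur]) ++ q₂ = q₁ ++ (cur :: q₂) := by simp
    rw [happ] at ho hi hn
    exact ⟨ho, hi, hn⟩


theorem pvBFS_char (rep : PySem.Dict String String) (hk : rep.keys.Nodup) (q0 : List String)
    (hq0 : ∀ t, t ∈ q0 ↔ (pvAppearsb rep.items t = true ∧ rep.get? t = none)) (hq0n : q0.Nodup)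
    (g : PySem.Dict String (List String)) (hg : ∀ c, g.getD c [] = pvChildren rep.items c)
    (N : Int) :
    ∀ (fuel d : Nat) (ind orders : PySem.Dict String Int),
      fuel + d = rep.items.length + 2 →
      pvOrdCut rep N d [] orders →
      pvIndCut rep d [] ind →
      pvOrdCut rep N (rep.items.length + 2) []
        (pvBFS g fuel ind orders (pvLayer rep.items q0 d) (N - (d : Int))) := by
  intro fuel
  induction fuel with
  | zero =>
    intro d ind orders hfuel hord hind
    have hd : d = rep.items.length + 2 := by omega
    subst hd
    exact hord
  | succ fuel ih =>
    intro d ind orders hfuel hord hind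
    rw [pvBFS]
    by_cases hemp : pvLayer rep.items q0 d = []
    · rw [if_pos hemp]
      intro t
      rw [hord t]
      cases hdep : pvDepth rep t with
      | none => rfl
      | some e =>
        by_cases happ : pvAppearsb rep.items t = true
        · by_cases hlt : e < d
          · have : e < rep.items.length + 2 := by omega
            simp [happ, hlt, this]
          · -- e ≥ d: t would be in layer e, but layer e is empty
            exfalso
            have hmin := pvChain_min rep (rep.items.length + 1) t e hdep
            have hmem : t ∈ pvLayer rep.items q0 e :=
              (pvLayer_mem rep hk q0 hq0 e t).mpr ⟨happ, hmin⟩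
            have : pvLayer rep.items q0 e = [] :=
              pvLayer_empty_mono rep.items q0 d e (by omega) hemp
            rw [this] at hmem
            cases hmem
        · simp [happ]
    · rw [if_neg hemp]
      -- the layer is nonempty, so d ≤ rep.items.length
      obtain ⟨t0, ht0⟩ := List.exists_mem_of_ne_nil _ hemp
      have ht0' := (pvLayer_mem rep hk q0 hq0 d t0).mp ht0
      have hdle : d ≤ rep.items.length := by
        have hb := pvChain_lt_fuel rep (d+1) t0 d ht0'.2
        have hmin := pvChain_min rep (d+1) t0 d ht0'.2
        have : d ≤ rep.keys.length := pvChain_bound rep (d+1) t0 d ht0'.2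
        simpa [PySem.Dict.keys] using this
      obtain ⟨ho, hi, hn⟩ := pvLevel_char rep hk q0 hq0 hq0n g hg N d hdle
        (pvLayer rep.items q0 d) [] ind orders [] (by simp) hord hind (by simp)
      simp only [List.nil_append] at ho hi hn
      -- convert the completed level to the (d+1) cut
      have ho' : pvOrdCut rep N (d+1) []
          (pvLevel g (N - (d:Int)) (ind, orders, []) (pvLayer rep.items q0 d)).2.1 := by
        intro t
        rw [ho t]
        cases hdep : pvDepth rep t with
        | none => rfl
        | some e =>
          simp only
          by_cases happ : pvAppearsb rep.items t = true
          · by_cases hed : e = d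
            · subst hed
              have hmem : t ∈ pvLayer rep.items q0 e :=
                (pvLayer_mem rep hk q0 hq0 e t).mpr ⟨happ, pvChain_min rep _ t e hdep⟩
              rw [if_pos ⟨happ, Or.inr ⟨rfl, hmem⟩⟩, if_pos ⟨happ, by omega⟩]
            · by_cases hlt : e < d
              · rw [if_pos ⟨happ, Or.inl hlt⟩, if_pos ⟨happ, by omega⟩]
              · have hL : ¬ (pvAppearsb rep.items t = true ∧ (e < d ∨ (e = d ∧ t ∈ pvLayer rep.items q0 d))) := by
                  rintro ⟨-, h | ⟨h, -⟩⟩ <;> omega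
                have hR : ¬ (pvAppearsb rep.items t = true ∧ (e < d + 1 ∨ (e = d + 1 ∧ t ∈ ([] : List String)))) := by
                  rintro ⟨-, h | ⟨h, hh⟩⟩
                  · omega
                  · simp at hh
                rw [if_neg hL, if_neg hR]
          · rw [if_neg (fun h => happ h.1), if_neg (fun h => happ h.1)]
      have hi' : pvIndCut rep (d+1) []
          (pvLevel g (N - (d:Int)) (ind, orders, []) (pvLayer rep.items q0 d)).1 := by
        intro n
        rw [hi n]
        cases hpn : rep.get? n with
        | none => simp only []
        | some c =>
          simp only []
          cases hdc : pvDepth rep c with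
          | none => simp only []
          | some e =>
            simp only []
            have happc : pvAppearsb rep.items c = true := by
              have h3 : (n, c) ∈ rep.items := (PySem.Dict.get?_eq_some_iff_mem_items _ _ _ hk).mp hpn
              have h4 : c ∈ rep.items.map (·.2) := List.mem_map.mpr ⟨(n, c), h3, rfl⟩
              simp [pvAppearsb, h4]
            by_cases hed : e = d
            · subst hed
              have hmem : c ∈ pvLayer rep.items q0 e :=
                (pvLayer_mem rep hk q0 hq0 e c).mpr ⟨happc, pvChain_min rep _ c e hdc⟩
              rw [if_pos (Or.inr ⟨rfl, hmem⟩), if_pos (by omega)]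
            · by_cases hlt : e < d
              · rw [if_pos (Or.inl hlt), if_pos (by omega)]
              · have hL : ¬ (e < d ∨ (e = d ∧ c ∈ pvLayer rep.items q0 d)) := by
                  rintro (h | ⟨h, -⟩) <;> omega
                have hR : ¬ (e < d + 1 ∨ (e = d + 1 ∧ c ∈ ([] : List String))) := by
                  rintro (h | ⟨h, hh⟩)
                  · omega
                  · simp at hh
                rw [if_neg hL, if_neg hR]
      have hord1 : N - (d : Int) - 1 = N - ((d+1 : Nat) : Int) := by push_cast; ring
      have hlay1 : (pvLevel g (N - (d:Int)) (ind, orders, []) (pvLayer rep.items q0 d)).2.2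
          = pvLayer rep.items q0 (d+1) := by
        rw [hn]; rfl
      rw [hlay1, hord1]
      exact ih (d+1) _ _ (by omega) ho' hi'

theorem pvInsertBy_congr {α : Type} (f g : α → α → Bool) (x : α) (ys : List α)
    (h : ∀ b ∈ ys, f x b = g x b) :
    PySem.List.insertBy f x ys = PySem.List.insertBy g x ys := by
  induction ys with
  | nil => rfl
  | cons y ys ih =>
    simp only [PySem.List.insertBy]
    rw [h y (by simp)]
    cases hgy : g x y
    · simp only [if_false, Bool.false_eq_true]
      rw [ih (fun b hb => h b (List.mem_cons_of_mem _ hb))]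
    · simp

theorem pvSorted_key_congr {α : Type} (xs : List α) (k1 k2 : α → Int)
    (h : ∀ a ∈ xs, ∀ b ∈ xs, (k1 a < k1 b ↔ k2 a < k2 b)) :
    PySem.List.sorted xs k1 false = PySem.List.sorted xs k2 false := by
  rw [PySem.List.sorted_eq_foldl_insertBy, PySem.List.sorted_eq_foldl_insertBy]
  have main : ∀ (l : List α) (acc : List α),
      (∀ a ∈ l, a ∈ xs) → (∀ a ∈ acc, a ∈ xs) →
      l.foldl (fun acc x => PySem.List.insertBy (fun a b => decide (k1 a < k1 b)) x acc) acc
        = l.foldl (fun acc x => PySem.List.insertBy (fun a b => decide (k2 a < k2 b)) x acc) acc := by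
    intro l
    induction l with
    | nil => intro acc _ _; rfl
    | cons x l ih =>
      intro acc hl hacc
      simp only [List.foldl_cons]
      have hx : x ∈ xs := hl x (by simp)
      have heq : PySem.List.insertBy (fun a b => decide (k1 a < k1 b)) x acc
          = PySem.List.insertBy (fun a b => decide (k2 a < k2 b)) x acc := by
        apply pvInsertBy_congr
        intro b hb
        have := h x hx b (hacc b hb)
        simp [this]
      rw [heq]
      apply ih
      · exact fun a ha => hl a (List.mem_cons_of_mem _ ha)
      · intro a ha
        have := PySem.List.mem_insertBy (before := fun a b => decide (k2 a < k2 b)) (y := a) (x := x) (ys := acc)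
        rw [this] at ha
        rcases ha with rfl | ha
        · exact hx
        · exact hacc a ha
  exact main xs [] (fun a ha => ha) (by simp)

theorem pv_orders_char (reports : List (String × String)) :
    ∀ t, (pvBFS ((PySem.Dict.ofList reports).items.foldl pvStep1 (PySem.Dict.empty, PySem.Dict.empty)).1
        ((PySem.Dict.ofList reports).items.length + 2)
        ((PySem.Dict.ofList reports).items.foldl pvStep1 (PySem.Dict.empty, PySem.Dict.empty)).2
        PySem.Dict.empty
        ((((PySem.Dict.ofList reports).items.foldl pvStep1 (PySem.Dict.empty, PySem.Dict.empty)).2.items.filter (fun p => p.2 == 0)).map (·.1))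
        (((PySem.Dict.ofList reports).items.foldl pvStep1 (PySem.Dict.empty, PySem.Dict.empty)).2.size)).get? t =
      match pvDepth (PySem.Dict.ofList reports) t with
      | some e => if pvAppearsb (PySem.Dict.ofList reports).items t = true ∧ e < (PySem.Dict.ofList reports).items.length + 2
          then some ((((PySem.Dict.ofList reports).items.foldl pvStep1 (PySem.Dict.empty, PySem.Dict.empty)).2.size : Int) - (e : Int)) else none
      | none => none := by
  intro t
  have hk : (PySem.Dict.ofList reports).keys.Nodup := PySem.Dict.nodup_keys_ofList reports
  have hkfst : (PySem.Dict.ofList reports).keys = (PySem.Dict.ofList reports).items.map (·.1) := rfl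
  have hsplit : (PySem.Dict.ofList reports).items.foldl pvStep1 (PySem.Dict.empty, PySem.Dict.empty)
      = ((PySem.Dict.ofList reports).items.foldl (fun d p => d.modify p.2 [] (· ++ [p.1])) PySem.Dict.empty,
         (PySem.Dict.ofList reports).items.foldl (fun d p => ((d.setdefault p.1 0).setdefault p.2 0).modify p.1 0 (· + 1)) PySem.Dict.empty) := by
    unfold pvStep1
    exact PySem.List.foldl_prod_mk
      (fun (d : PySem.Dict String (List String)) (p : String × String) => d.modify p.2 [] (· ++ [p.1]))
      (fun (d : PySem.Dict String Int) (p : String × String) => ((d.setdefault p.1 0).setdefault p.2 0).modify p.1 0 (· + 1))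
      (PySem.Dict.ofList reports).items PySem.Dict.empty PySem.Dict.empty
  rw [hsplit]
  set IND := (PySem.Dict.ofList reports).items.foldl
      (fun (d : PySem.Dict String Int) p => ((d.setdefault p.1 0).setdefault p.2 0).modify p.1 0 (· + 1))
      PySem.Dict.empty with hIND
  set GR := (PySem.Dict.ofList reports).items.foldl
      (fun (d : PySem.Dict String (List String)) p => d.modify p.2 [] (· ++ [p.1]))
      PySem.Dict.empty with hGR
  set Q0 := (IND.items.filter (fun p => p.2 == 0)).map (·.1) with hQ0
  obtain ⟨hc, hg, hkn⟩ := pv_ind_build (PySem.Dict.ofList reports).items PySem.Dict.empty [] []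
    (by simpa using (hkfst ▸ hk))
    (by intro s; simp [PySem.Dict.contains_empty])
    (by intro s; simp [PySem.Dict.getD_empty])
    (by simp [PySem.Dict.keys_empty])
  simp only [List.nil_append] at hc hg
  rw [← hIND] at hc hg hkn
  have hq0mem : ∀ s, s ∈ Q0 ↔
      (pvAppearsb (PySem.Dict.ofList reports).items s = true ∧ (PySem.Dict.ofList reports).get? s = none) := by
    intro s
    constructor
    · intro hs
      simp only [hQ0, List.mem_map, List.mem_filter] at hs
      obtain ⟨⟨a, v⟩, ⟨hm, hv⟩, rfl⟩ := hs
      simp only [beq_iff_eq] at hv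
      subst hv
      have hget := (PySem.Dict.get?_eq_some_iff_mem_items IND a 0 hkn).mpr hm
      have hcon : IND.contains a = true := by
        rw [PySem.Dict.contains_eq_isSome_get?, hget]; rfl
      have hgd := hg a
      rw [PySem.Dict.getD_eq_get?_getD, hget] at hgd
      have hnk : a ∉ (PySem.Dict.ofList reports).items.map (·.1) := by
        intro hmem
        rw [if_pos hmem] at hgd
        simp at hgd
      refine ⟨?_, ?_⟩
      · rw [hc a] at hcon
        simpa [pvAppearsb] using hcon
      · rw [PySem.Dict.get?_eq_none_iff_not_mem_keys, hkfst]
        exact hnk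
    · rintro ⟨happ, hnone⟩
      have hnk : s ∉ (PySem.Dict.ofList reports).items.map (·.1) := by
        rw [PySem.Dict.get?_eq_none_iff_not_mem_keys, hkfst] at hnone
        exact hnone
      have hcon : IND.contains s = true := by
        rw [hc s]
        simpa [pvAppearsb] using happ
      have hgd := hg s
      rw [if_neg hnk] at hgd
      have hget : IND.get? s = some 0 := by
        rw [pv_get?_char IND (0 : Int) s, if_pos hcon, hgd]
      have hm := (PySem.Dict.get?_eq_some_iff_mem_items IND s 0 hkn).mp hget
      simp only [hQ0, List.mem_map, List.mem_filter]
      exact ⟨(s, 0), ⟨hm, by simp⟩, rfl⟩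
  have hq0nodup : Q0.Nodup := by
    have hsub : List.Sublist Q0 (IND.items.map (·.1)) :=
      List.Sublist.map _ List.filter_sublist
    exact List.Nodup.sublist hsub hkn
  have hgr : ∀ c, GR.getD c [] = pvChildren (PySem.Dict.ofList reports).items c :=
    pv_graph_build (PySem.Dict.ofList reports).items
  have hocut : pvOrdCut (PySem.Dict.ofList reports) (IND.size : Int) 0 [] PySem.Dict.empty := by
    intro s
    rw [PySem.Dict.get?_empty]
    cases hdep : pvDepth (PySem.Dict.ofList reports) s with
    | none => rfl
    | some e => simp
  have hicut : pvIndCut (PySem.Dict.ofList reports) 0 [] IND := by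
    intro n
    rw [hg n]
    cases hpn : (PySem.Dict.ofList reports).get? n with
    | none =>
      have hnk : n ∉ (PySem.Dict.ofList reports).items.map (·.1) := by
        rw [PySem.Dict.get?_eq_none_iff_not_mem_keys, hkfst] at hpn
        exact hpn
      simp [hnk]
    | some c =>
      have hmk : n ∈ (PySem.Dict.ofList reports).items.map (·.1) := by
        have hx2 : n ∈ (PySem.Dict.ofList reports).keys := by
          by_contra hx
          rw [← PySem.Dict.get?_eq_none_iff_not_mem_keys] at hx
          rw [hx] at hpn; cases hpn
        rwa [hkfst] at hx2
      rw [if_pos hmk]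
      cases hdc : pvDepth (PySem.Dict.ofList reports) c with
      | none => simp [hdc]
      | some e => simp [hdc]
  have hmain := pvBFS_char (PySem.Dict.ofList reports) hk Q0 hq0mem hq0nodup GR hgr
    (IND.size : Int) ((PySem.Dict.ofList reports).items.length + 2) 0 IND PySem.Dict.empty
    (by omega) hocut hicut
  simp only [Nat.cast_zero, sub_zero] at hmain
  have h := hmain t
  rw [show pvLayer (PySem.Dict.ofList reports).items Q0 0 = Q0 from rfl] at h
  rw [h]
  cases hdep : pvDepth (PySem.Dict.ofList reports) t with
  | none => rfl
  | some e => simp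

theorem solution_spec : Claim_equal_solution := by
  intro employees reports _hdom hpre
  show solution employees reports = solution_alt employees reports
  have hsz : (PySem.Dict.ofList reports).size = (PySem.Dict.ofList reports).items.length := rfl
  have hkey : ∀ x ∈ employees, ∃ en : Nat,
      ((pvBFS ((PySem.Dict.ofList reports).items.foldl pvStep1 (PySem.Dict.empty, PySem.Dict.empty)).1
        ((PySem.Dict.ofList reports).items.length + 2)
        ((PySem.Dict.ofList reports).items.foldl pvStep1 (PySem.Dict.empty, PySem.Dict.empty)).2
        PySem.Dict.empty
        ((((PySem.Dict.ofList reports).items.foldl pvStep1 (PySem.Dict.empty, PySem.Dict.empty)).2.items.filter (fun p => p.2 == 0)).map (·.1))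
        (((PySem.Dict.ofList reports).items.foldl pvStep1 (PySem.Dict.empty, PySem.Dict.empty)).2.size)).getD x.2 0
          = ((((PySem.Dict.ofList reports).items.foldl pvStep1 (PySem.Dict.empty, PySem.Dict.empty)).2.size : Int) - (en : Int))) ∧
      (-((pvWalk (PySem.Dict.ofList reports) ((PySem.Dict.ofList reports).size + 1) 0 x.2).getD 0) = -(en : Int)) := by
    intro x hx
    obtain ⟨happ, hsome⟩ := hpre x hx
    obtain ⟨en, hen⟩ := Option.isSome_iff_exists.mp hsome
    have hdep : pvDepth (PySem.Dict.ofList reports) x.2 = some en := hen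
    refine ⟨en, ?_, ?_⟩
    · rw [PySem.Dict.getD_eq_get?_getD, pv_orders_char reports x.2, hdep]
      have hlt : en < (PySem.Dict.ofList reports).items.length + 2 := by
        have := pvChain_lt_fuel (PySem.Dict.ofList reports) ((PySem.Dict.ofList reports).items.length + 1) x.2 en hen
        omega
      simp [happ, hlt]
    · rw [hsz, pvWalk_eq_chain (PySem.Dict.ofList reports) ((PySem.Dict.ofList reports).items.length + 1) 0 x.2, hen]
      simp
  show PySem.List.sorted employees (fun x =>
      (pvBFS ((PySem.Dict.ofList reports).items.foldl pvStep1 (PySem.Dict.empty, PySem.Dict.empty)).1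
        ((PySem.Dict.ofList reports).items.length + 2)
        ((PySem.Dict.ofList reports).items.foldl pvStep1 (PySem.Dict.empty, PySem.Dict.empty)).2
        PySem.Dict.empty
        ((((PySem.Dict.ofList reports).items.foldl pvStep1 (PySem.Dict.empty, PySem.Dict.empty)).2.items.filter (fun p => p.2 == 0)).map (·.1))
        (((PySem.Dict.ofList reports).items.foldl pvStep1 (PySem.Dict.empty, PySem.Dict.empty)).2.size)).getD x.2 0) false
    = PySem.List.sorted employees (fun e =>
      -((pvWalk (PySem.Dict.ofList reports) ((PySem.Dict.ofList reports).size + 1) 0 e.2).getD 0)) false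
  apply pvSorted_key_congr
  intro a ha b hb
  obtain ⟨ea, hka, hwa⟩ := hkey a ha
  obtain ⟨eb, hkb, hwb⟩ := hkey b hb
  rw [hka, hkb, hwa, hwb]
  omega
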